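-- pv_equiv track=rewrite | github.com/alex-cobb/spowtd | src/spowtd/fit_offsets.py | get_series_ids
-- ===== SOURCE A (Python) =====
-- def get_series_ids(head_mapping):
--     """Arrange series ids in sequence for matrix equations
--
--     Assembles series (event) ids in a sequence representing the order in which they will
--     appear in vectors and matrices.  Returns a list of series ids in this consistent
--     order.
--
--     """
--     return sorted(
--         set().union(
--             *(
--                 (series_id for series_id, _ in seq)
--                 for seq in list(head_mapping.values())
--             )
--         )
--     )
-- ===== SOURCE B (Python) =====
-- def get_series_ids(head_mapping):
--     """Arrange series ids in sequence for matrix equations.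
--
--     Maintains a sorted duplicate-free accumulator and inserts every id
--     in place (ordered insertion), so no set and no final sort is needed.
--     """
--     acc = []
--     for seq in head_mapping.values():
--         for series_id, _ in seq:
--             i = 0
--             while i < len(acc) and acc[i] < series_id:
--                 i += 1
--             if i == len(acc) or acc[i] != series_id:
--                 acc.insert(i, series_id)
--     return acc
-- ===== Notes on version B (the rewrite author's own statement) =====
-- stated objective: alternative
-- what changed: Replaces the hash-set union followed by a final sort with a single pass that keeps a sorted duplicate-free accumulator and inserts each id in order as it is encountered (ordered insertion, no set, no sort).
import Mathlib
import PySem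

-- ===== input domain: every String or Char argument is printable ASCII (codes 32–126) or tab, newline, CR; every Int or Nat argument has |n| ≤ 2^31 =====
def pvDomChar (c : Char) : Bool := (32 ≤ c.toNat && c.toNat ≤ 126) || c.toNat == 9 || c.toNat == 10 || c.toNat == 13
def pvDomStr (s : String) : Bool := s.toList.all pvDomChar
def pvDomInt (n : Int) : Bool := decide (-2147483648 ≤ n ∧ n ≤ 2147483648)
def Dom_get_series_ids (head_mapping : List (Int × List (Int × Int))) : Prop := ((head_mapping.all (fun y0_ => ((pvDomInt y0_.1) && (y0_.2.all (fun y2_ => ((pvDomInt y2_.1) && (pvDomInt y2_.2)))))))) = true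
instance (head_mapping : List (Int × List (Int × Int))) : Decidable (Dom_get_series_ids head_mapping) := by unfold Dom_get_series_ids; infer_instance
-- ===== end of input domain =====

-- ===== PORT A =====
-- B keeps a sorted duplicate-free accumulator and inserts each id in order as it
-- arrives (ordered insertion) instead of A's hash-set union followed by a sort
-- (alternative algorithm, similar cost).
-- Port of A: set().union(*(ids of each seq)) folded over head_mapping.values(), then sorted.
def get_series_ids (head_mapping : List (Int × List (Int × Int))) : List Int :=
  PySem.List.sorted
    ((head_mapping.map (fun p => p.2)).foldl
      (fun s seq => PySem.Set.union s (seq.map (fun q => q.1)))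
      PySem.Set.empty)
    (fun x => x) false

-- ===== PORT B =====
-- B's inner while/insert loop: walk past smaller elements, skip an equal one,
-- otherwise insert before the first larger one.
def insOrd (x : Int) : List Int → List Int
  | [] => [x]
  | y :: r => if y < x then y :: insOrd x r else if y = x then y :: r else x :: y :: r

def get_series_ids_alt (head_mapping : List (Int × List (Int × Int))) : List Int :=
  head_mapping.foldl (fun acc p => p.2.foldl (fun acc q => insOrd q.1 acc) acc) []

-- ===== PRECONDITION & SPEC =====
def Spec_get_series_ids (head_mapping : List (Int × List (Int × Int))) (out : List Int) : Prop := out = get_series_ids_alt head_mapping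
instance (head_mapping : List (Int × List (Int × Int))) (out : List Int) : Decidable (Spec_get_series_ids head_mapping out) := by unfold Spec_get_series_ids; infer_instance

-- ===== CLAIM (what is proved, stated in full; the proofs are below) =====
def Claim_equal_get_series_ids : Prop := ∀ (head_mapping : List (Int × List (Int × Int))), Dom_get_series_ids head_mapping → Spec_get_series_ids head_mapping (get_series_ids head_mapping)

-- ===== LEMMAS AND PROOFS =====

lemma mem_insOrd (x y : Int) (l : List Int) : y ∈ insOrd x l ↔ y = x ∨ y ∈ l := by
  induction l with
  | nil => simp [insOrd]
  | cons z r ih =>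
    by_cases h1 : z < x
    · simp only [insOrd, if_pos h1, List.mem_cons, ih]; tauto
    · by_cases h2 : z = x
      · subst h2; simp [insOrd]
      · simp [insOrd, h1, h2]

lemma pairwise_insOrd (x : Int) (l : List Int) (h : l.Pairwise (· < ·)) :
    (insOrd x l).Pairwise (· < ·) := by
  induction l with
  | nil => simp [insOrd]
  | cons z r ih =>
    have hz : ∀ w ∈ r, z < w := fun w hw => List.rel_of_pairwise_cons h hw
    by_cases h1 : z < x
    · simp only [insOrd, if_pos h1]
      refine List.pairwise_cons.mpr ⟨?_, ih h.tail⟩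
      intro w hw
      rcases (mem_insOrd x w r).mp hw with rfl | hw
      · exact h1
      · exact hz w hw
    · by_cases h2 : z = x
      · subst h2; simp only [insOrd, if_neg h1]
        exact h
      · have hx : x < z := lt_of_le_of_ne (not_lt.mp h1) (Ne.symm h2)
        simp only [insOrd, if_neg h1, if_neg h2]
        refine List.pairwise_cons.mpr ⟨?_, h⟩
        intro w hw
        rcases List.mem_cons.mp hw with rfl | hw
        · exact hx
        · exact lt_trans hx (hz w hw)

-- the nested fold of B collapses to a fold over the flattened id list
lemma foldl_foldl_eq_flat (f : List Int → Int → List Int)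
    (hm : List (Int × List (Int × Int))) :
    ∀ acc : List Int,
      hm.foldl (fun acc p => p.2.foldl (fun a q => f a q.1) acc) acc
        = (hm.flatMap (fun p => p.2.map (fun q => q.1))).foldl f acc := by
  induction hm with
  | nil => intro acc; simp
  | cons p hm ih =>
    intro acc
    rw [List.foldl_cons, ih, List.flatMap_cons, List.foldl_append, List.foldl_map]

-- the insertion fold is sorted, duplicate-free, and has exactly the inserted elements
lemma foldl_insOrd_props (xs : List Int) :
    ∀ acc : List Int, acc.Pairwise (· < ·) →
      (xs.foldl (fun a x => insOrd x a) acc).Pairwise (· < ·) ∧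
      (∀ y, y ∈ xs.foldl (fun a x => insOrd x a) acc ↔ y ∈ xs ∨ y ∈ acc) := by
  induction xs with
  | nil => intro acc h; simp [h]
  | cons x r ih =>
    intro acc h
    obtain ⟨h1, h2⟩ := ih (insOrd x acc) (pairwise_insOrd x acc h)
    refine ⟨h1, fun y => ?_⟩
    rw [List.foldl_cons, h2 y, mem_insOrd]
    simp; tauto

-- A's folded set union equals set(flatten)
lemma foldl_union_eq_ofList (ls : List (List (Int × Int))) :
    ∀ s : PySem.Set Int,
      ls.foldl (fun s seq => PySem.Set.union s (seq.map (fun q => q.1))) s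
        = PySem.Set.update s (ls.flatMap (fun seq => seq.map (fun q => q.1))) := by
  induction ls with
  | nil => intro s; simp [PySem.Set.update]
  | cons l ls ih =>
    intro s
    rw [List.foldl_cons, ih, List.flatMap_cons, PySem.Set.update_append]
    rfl

-- ===== VERDICT (by name: the statement is the Claim_ definition above) =====
theorem get_series_ids_spec : Claim_equal_get_series_ids := by
  intro hm _
  unfold Spec_get_series_ids
  simp only [get_series_ids, get_series_ids_alt]
  rw [foldl_foldl_eq_flat (fun a x => insOrd x a) hm []]
  set flat := hm.flatMap (fun p => p.2.map (fun q => q.1)) with hflat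
  have hflat' : (hm.map (fun p => p.2)).flatMap (fun seq => seq.map (fun q => q.1)) = flat := by
    rw [List.flatMap_map]
  rw [foldl_union_eq_ofList, hflat']
  have hset : PySem.Set.update PySem.Set.empty flat = PySem.Set.ofList flat := rfl
  rw [hset]
  obtain ⟨hpw, hmem⟩ := foldl_insOrd_props flat [] (by simp)
  set R := flat.foldl (fun a x => insOrd x a) [] with hR
  have hnodup : R.Nodup := hpw.imp (fun h => ne_of_lt h)
  have hperm : R.Perm (PySem.Set.ofList flat) := by
    rw [List.perm_ext_iff_of_nodup hnodup (PySem.Set.nodup_ofList flat)]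
    intro y
    rw [hmem y, PySem.Set.mem_ofList]
    simp
  have hfin := PySem.List.sorted_eq_of_perm_of_pairwise_lt (xs := PySem.Set.ofList flat)
    (ys := R) (key := fun x => x) hperm (by simpa using hpw)
  simpa using hfin
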